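-- pv_equiv track=rewrite | github.com/SimuIacron/cluster_analysis_for_sat_instances | DataAnalysis/scoring.py | convert_families_to_int
-- ===== SOURCE A (Python) =====
-- def convert_families_to_int(instance_family):
--     counter = 0
--     family_dict = {}
--     instance_family_int = []
--     for item in instance_family:
--         if item[0] not in family_dict:
--             family_dict[item[0]] = counter
--             counter = counter + 1
--
--         instance_family_int.append(family_dict[item[0]])
--
--     return instance_family_int
-- ===== SOURCE B (Python) =====
-- def convert_families_to_int(instance_family):
--     # No lookup table at all: the integer code of a label equals the number
--     # of distinct labels occurring strictly before its first occurrence.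
--     keys = [item[0] for item in instance_family]
--     return [len(set(keys[:keys.index(k)])) for k in keys]
-- ===== Notes on version B (the rewrite author's own statement) =====
-- stated objective: alternative
-- what changed: Drops the label-to-code dictionary entirely: B computes each element's code directly as the number of distinct labels in the prefix before that label's first occurrence (len(set(keys[:keys.index(k)]))), instead of A's single pass that grows a dict with a counter.
-- outside the precondition, e.g. on convert_families_to_int([()]): A raises IndexError, B raises IndexError
import Mathlib
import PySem

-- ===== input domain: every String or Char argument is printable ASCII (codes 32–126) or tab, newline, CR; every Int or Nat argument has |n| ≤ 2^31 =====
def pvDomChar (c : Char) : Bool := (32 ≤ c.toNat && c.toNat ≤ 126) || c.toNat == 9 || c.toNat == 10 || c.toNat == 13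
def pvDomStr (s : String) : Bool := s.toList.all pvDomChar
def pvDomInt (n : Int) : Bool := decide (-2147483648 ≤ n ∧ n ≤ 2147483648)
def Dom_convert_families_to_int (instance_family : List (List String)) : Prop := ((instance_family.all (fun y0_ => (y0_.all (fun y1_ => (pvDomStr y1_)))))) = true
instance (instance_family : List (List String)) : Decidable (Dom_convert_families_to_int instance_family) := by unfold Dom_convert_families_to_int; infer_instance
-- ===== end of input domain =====

-- B has no label-to-code table at all: each element's code is the count of distinct
-- labels in the prefix strictly before that label's first occurrence; objective:
-- alternative algorithm (not faster).

-- item[0]: Python raises IndexError on an empty item; Pre_ excludes that, the total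
-- form below returns "" there (never reached under Pre_).
def pvKey (item : List String) : String := (PySem.List.pyGet? item 0).getD ""

-- ===== PORT A =====
def convert_families_to_int (instance_family : List (List String)) : List Int :=
  -- state = (counter, family_dict, instance_family_int); Python's family_dict[item[0]]
  -- after the guaranteed insert is ported as getD (the key is always present there).
  (instance_family.foldl
    (fun (st : Int × PySem.Dict String Int × List Int) item =>
      let k := pvKey item
      let st' :=
        if st.2.1.contains k = false then
          (st.1 + 1, st.2.1.insert k st.1, st.2.2)
        else st
      (st'.1, st'.2.1, st'.2.2 ++ [st'.2.1.getD k 0]))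
    ((0 : Int), PySem.Dict.empty, ([] : List Int))).2.2

-- ===== PORT B =====
def convert_families_to_int_alt (instance_family : List (List String)) : List Int :=
  let keys := instance_family.map pvKey
  keys.map (fun k =>
    ((PySem.Set.ofList
        (PySem.List.slice keys none
          (some (((PySem.List.index? keys k).getD 0 : Nat) : Int)))).length : Int))

-- ===== PRECONDITION & SPEC =====
-- Pre_ excludes exactly the inputs containing an empty inner list, on which Python A
-- (and Python B alike) raises IndexError at item[0].
def Pre_convert_families_to_int (instance_family : List (List String)) : Prop :=
  ∀ item ∈ instance_family, item ≠ []
instance (instance_family : List (List String)) : Decidable (Pre_convert_families_to_int instance_family) := by unfold Pre_convert_families_to_int; infer_instance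

def pvWitness_convert_families_to_int : List (List String) :=
  [["a", "x"], ["b"], ["a"], ["c"], ["b"]]

def Spec_convert_families_to_int (instance_family : List (List String)) (out : List Int) : Prop := out = convert_families_to_int_alt instance_family
instance (instance_family : List (List String)) (out : List Int) : Decidable (Spec_convert_families_to_int instance_family out) := by unfold Spec_convert_families_to_int; infer_instance

-- ===== CLAIM =====
def Claim_equal_convert_families_to_int : Prop := ∀ (instance_family : List (List String)), Dom_convert_families_to_int instance_family → Pre_convert_families_to_int instance_family → Spec_convert_families_to_int instance_family (convert_families_to_int instance_family)

-- ===== LEMMAS AND PROOFS =====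

-- folding Set.add only appends
theorem pv_update_append (l : List String) : ∀ (s : List String),
    ∃ t, l.foldl PySem.Set.add s = s ++ t := by
  induction l with
  | nil => exact fun s => ⟨[], by simp⟩
  | cons x l ih =>
    intro s
    by_cases h : x ∈ s
    · have hadd : PySem.Set.add s x = s := by simp [PySem.Set.add, h]
      obtain ⟨t, ht⟩ := ih s
      exact ⟨t, by rw [List.foldl_cons, hadd]; exact ht⟩
    · have hadd : PySem.Set.add s x = s ++ [x] := by simp [PySem.Set.add, h]
      obtain ⟨t, ht⟩ := ih (s ++ [x])
      exact ⟨x :: t, by rw [List.foldl_cons, hadd, ht]; simp⟩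

theorem pv_idxOf_update (s : List String) (l : List String) (k : String) (hk : k ∈ s) :
    (l.foldl PySem.Set.add s).idxOf k = s.idxOf k := by
  obtain ⟨t, ht⟩ := pv_update_append l s
  rw [ht, List.idxOf_append_of_mem hk]

-- A's loop invariant: state = (|s|, a dict coding s by first-seen index, acc)
theorem pv_foldA (xs : List (List String)) :
    ∀ (s : List String) (d : PySem.Dict String Int) (acc : List Int),
    s.Nodup →
    (∀ k, d.contains k = decide (k ∈ s)) →
    (∀ k, k ∈ s → d.getD k 0 = (s.idxOf k : Int)) →
    (xs.foldl
      (fun (st : Int × PySem.Dict String Int × List Int) item =>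
        let k := pvKey item
        let st' :=
          if st.2.1.contains k = false then
            (st.1 + 1, st.2.1.insert k st.1, st.2.2)
          else st
        (st'.1, st'.2.1, st'.2.2 ++ [st'.2.1.getD k 0]))
      ((s.length : Int), d, acc)).2.2
    = acc ++ xs.map (fun item => (((xs.map pvKey).foldl PySem.Set.add s).idxOf (pvKey item) : Int)) := by
  induction xs with
  | nil => intro s d acc _ _ _; simp
  | cons item xs ih =>
    intro s d acc hnd hc hg
    by_cases hmem : pvKey item ∈ s
    · have hcontains : d.contains (pvKey item) = true := by rw [hc]; simpa using hmem
      have hadd : PySem.Set.add s (pvKey item) = s := by simp [PySem.Set.add, hmem]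
      have hrec := ih s d (acc ++ [d.getD (pvKey item) 0]) hnd hc hg
      simp only [List.foldl_cons, List.map_cons, hadd, hcontains, Bool.true_eq_false, if_false]
      rw [hrec, hg _ hmem, pv_idxOf_update s (xs.map pvKey) _ hmem]
      simp
    · have hcontains : d.contains (pvKey item) = false := by rw [hc]; simpa using hmem
      have hadd : PySem.Set.add s (pvKey item) = s ++ [pvKey item] := by
        simp [PySem.Set.add, hmem]
      have hnd' : (s ++ [pvKey item]).Nodup := by
        simp [List.nodup_append, hnd]
        exact fun a ha hak => hmem (hak ▸ ha)
      have hc' : ∀ k', (d.insert (pvKey item) (s.length : Int)).contains k'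
          = decide (k' ∈ s ++ [pvKey item]) := by
        intro k'
        rw [PySem.Dict.contains_insert, hc]
        by_cases h : k' = pvKey item <;> simp [h]
      have hg' : ∀ k', k' ∈ s ++ [pvKey item] →
          (d.insert (pvKey item) (s.length : Int)).getD k' 0
          = (((s ++ [pvKey item]).idxOf k' : Nat) : Int) := by
        intro k' hk'
        by_cases h : k' = pvKey item
        · subst h
          rw [PySem.Dict.getD_insert_self, List.idxOf_append_of_notMem hmem]
          simp
        · rw [PySem.Dict.getD_insert, if_neg h]
          have hmem' : k' ∈ s := by
            rcases List.mem_append.mp hk' with h1 | h1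
            · exact h1
            · simp at h1; exact absurd h1 h
          rw [hg _ hmem', List.idxOf_append_of_mem hmem']
      have hrec := ih (s ++ [pvKey item]) (d.insert (pvKey item) (s.length : Int))
        (acc ++ [(d.insert (pvKey item) (s.length : Int)).getD (pvKey item) 0]) hnd' hc' hg'
      simp only [List.foldl_cons, List.map_cons, hadd, hcontains, if_true]
      have hlen : (s.length : Int) + 1 = ((s ++ [pvKey item]).length : Int) := by simp
      rw [hlen, hrec]
      have hidx : (((s ++ [pvKey item]).idxOf (pvKey item) : Nat) : Int) = (s.length : Int) := by
        rw [List.idxOf_append_of_notMem hmem]; simp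
      have hidx2 : ((xs.map pvKey).foldl PySem.Set.add (s ++ [pvKey item])).idxOf (pvKey item)
          = (s ++ [pvKey item]).idxOf (pvKey item) :=
        pv_idxOf_update _ _ _ (by simp)
      rw [PySem.Dict.getD_insert_self, hidx2, hidx]
      simp

-- bridge: first-seen index of k = number of distinct elements in the prefix before
-- k's first occurrence (with any seed accumulator s not containing k)
theorem pv_bridge (l : List String) : ∀ (s : List String) (k : String), k ∉ s → k ∈ l →
    (l.foldl PySem.Set.add s).idxOf k
      = ((l.take (l.idxOf k)).foldl PySem.Set.add s).length := by
  induction l with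
  | nil => intro s k _ hk; simp at hk
  | cons x t ih =>
    intro s k hks hkl
    by_cases h : x = k
    · subst h
      have hadd : PySem.Set.add s x = s ++ [x] := by simp [PySem.Set.add, hks]
      rw [List.idxOf_cons_self, List.take_zero, List.foldl_nil, List.foldl_cons, hadd,
        pv_idxOf_update _ _ _ (by simp), List.idxOf_append_of_notMem hks]
      simp
    · have hkt : k ∈ t := List.mem_of_ne_of_mem (fun he => h he.symm) hkl
      have hks' : k ∉ PySem.Set.add s x := by
        by_cases hx : x ∈ s <;> simp [PySem.Set.add, hx, hks, Ne.symm h]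
      rw [List.idxOf_cons_ne _ (by exact h), List.take_succ_cons, List.foldl_cons,
        List.foldl_cons]
      exact ih (PySem.Set.add s x) k hks' hkt

-- list.index on a present element is its first index
theorem pv_index?_mem (l : List String) (k : String) (h : k ∈ l) :
    PySem.List.index? l k = some (l.idxOf k) := by
  induction l with
  | nil => simp at h
  | cons x t ih =>
    by_cases hx : x = k
    · subst hx; rw [PySem.List.index?_cons_self, List.idxOf_cons_self]
    · have hkt : k ∈ t := List.mem_of_ne_of_mem (fun he => hx he.symm) h
      rw [PySem.List.index?_cons_of_ne t hx, ih hkt, List.idxOf_cons_ne _ hx]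
      rfl

-- ===== VERDICT =====
theorem convert_families_to_int_spec : Claim_equal_convert_families_to_int := by
  unfold Claim_equal_convert_families_to_int
  intro xs _ _
  unfold Spec_convert_families_to_int convert_families_to_int convert_families_to_int_alt
  have hA := pv_foldA xs [] PySem.Dict.empty [] (by simp)
    (by intro k; simp [PySem.Dict.contains_empty]) (by intro k hk; simp at hk)
  simp only [List.length_nil, Nat.cast_zero] at hA
  rw [hA]
  simp only [List.nil_append, List.map_map]
  apply List.map_congr_left
  intro item hitem
  simp only [Function.comp]
  set keys := xs.map pvKey with hkeys
  have hk : pvKey item ∈ keys := List.mem_map.mpr ⟨item, hitem, rfl⟩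
  have hidx : PySem.List.index? keys (pvKey item) = some (keys.idxOf (pvKey item)) := by
    exact pv_index?_mem keys _ hk
  rw [hidx]
  simp only [Option.getD_some]
  rw [PySem.List.slice_to_natCast, PySem.Set.ofList_eq_foldl]
  congr 1
  exact pv_bridge keys [] (pvKey item) (by simp) hk
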